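-- pv_equiv track=rewrite | github.com/LeeJony000/Shift_Cipher_For_Ascii | Shift_Cipher_For_Ascii.py | shift_cipher_encrypt
-- ===== SOURCE A (Python) =====
-- def shift_cipher_encrypt(s, r_move, space_flag):
--     list_s = []
--     c = ""
--     if space_flag.upper() == "Y":
--         for i in s:
--             list_s.append(ord(i))
--         for i in list_s:
--             i += r_move
--             while i > 127:
--                 i -= 128
--             c += chr(i)
--     elif space_flag.upper() == "N":
--         for i in s:
--             list_s.append(ord(i))
--             for i in list_s:
--                 if i == 32:
--                     pass
--                 else:
--                     i += r_move
--                     while i > 127: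
--                         i -= 128
--             c += chr(i)
--     return c
-- ===== SOURCE B (Python) =====
-- def shift_cipher_encrypt(s, r_move, space_flag):
--     f = space_flag.upper()
--     if f != "Y" and f != "N":
--         return ""
--     out = []
--     for ch in s:
--         i = ord(ch)
--         if f == "Y" or i != 32:
--             i += r_move
--             while i > 127:
--                 i -= 128
--         out.append(chr(i))
--     return "".join(out)
-- ===== Notes on version B (the rewrite author's own statement) =====
-- stated objective: faster
-- what changed: One merged per-character pass (shift unless the N flag and a space, then join) replaces A's ord-list accumulation plus, in the N branch, a full re-scan of all previously collected codes for every character.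
import Mathlib
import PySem

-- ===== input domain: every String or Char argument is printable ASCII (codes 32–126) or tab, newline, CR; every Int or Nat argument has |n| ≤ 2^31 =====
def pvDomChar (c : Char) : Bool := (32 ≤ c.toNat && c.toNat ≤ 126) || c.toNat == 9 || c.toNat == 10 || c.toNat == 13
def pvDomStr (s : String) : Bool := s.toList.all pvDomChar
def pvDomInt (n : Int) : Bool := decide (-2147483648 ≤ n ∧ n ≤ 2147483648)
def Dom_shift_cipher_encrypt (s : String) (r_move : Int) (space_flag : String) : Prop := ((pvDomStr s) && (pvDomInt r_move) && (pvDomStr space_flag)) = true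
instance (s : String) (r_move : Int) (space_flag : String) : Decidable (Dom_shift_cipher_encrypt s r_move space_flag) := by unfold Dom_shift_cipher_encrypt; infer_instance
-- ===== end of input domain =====

-- B is a single per-character pass (one merged Y/N loop, join at the end) replacing A's
-- two-loop Y branch and the N branch's quadratic re-scan of all previously collected codes.

-- the 'while i > 127: i -= 128' loop, shared by both Pythons
def pvReduce (i : Int) : Int :=
  if h : i > 127 then pvReduce (i - 128) else i
termination_by (i - 127).toNat
decreasing_by omega

-- chr(i) on the in-range values admitted by Pre_ (0 ≤ i ≤ 127 there)
def pvChr (i : Int) : Char := Char.ofNat i.toNat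

-- ===== PORT A =====
-- one step of A's N-branch outer loop: append ord to list_s, re-scan the whole
-- list_s rebinding i (the last rebinding wins), then c += chr(i)
def pvAStepN (r_move : Int) (st : List Int × String) (ch : Char) : List Int × String :=
  let list_s := st.1 ++ [(ch.toNat : Int)]
  let i := list_s.foldl (fun _ j => if j = 32 then j else pvReduce (j + r_move)) 0
  (list_s, st.2.push (pvChr i))

def shift_cipher_encrypt (s : String) (r_move : Int) (space_flag : String) : String :=
  if PySem.Str.upper space_flag = "Y" then
    let list_s := s.toList.foldl (fun l ch => l ++ [(ch.toNat : Int)]) []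
    list_s.foldl (fun c i => c.push (pvChr (pvReduce (i + r_move)))) ""
  else if PySem.Str.upper space_flag = "N" then
    (s.toList.foldl (pvAStepN r_move) ([], "")).2
  else ""

-- ===== PORT B =====
def shift_cipher_encrypt_alt (s : String) (r_move : Int) (space_flag : String) : String :=
  let f := PySem.Str.upper space_flag
  if f ≠ "Y" ∧ f ≠ "N" then ""
  else
    String.ofList (s.toList.map (fun ch =>
      let i : Int := (ch.toNat : Int)
      if f = "Y" ∨ i ≠ 32 then pvChr (pvReduce (i + r_move)) else pvChr i))

-- ===== PRECONDITION & SPEC =====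
-- Pre_ excludes exactly the inputs where chr raises ValueError in both Pythons:
-- a shifted character whose code plus r_move is negative.
def Pre_shift_cipher_encrypt (s : String) (r_move : Int) (space_flag : String) : Prop :=
  (PySem.Str.upper space_flag = "Y" → s.toList.all (fun ch => decide (0 ≤ (ch.toNat : Int) + r_move)) = true) ∧
  (PySem.Str.upper space_flag = "N" → s.toList.all (fun ch => ch = ' ' || decide (0 ≤ (ch.toNat : Int) + r_move)) = true)

instance (s : String) (r_move : Int) (space_flag : String) : Decidable (Pre_shift_cipher_encrypt s r_move space_flag) := by
  unfold Pre_shift_cipher_encrypt; infer_instance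

def pvWitness_shift_cipher_encrypt : String × Int × String := ("ab c", 5, "n")

def Spec_shift_cipher_encrypt (s : String) (r_move : Int) (space_flag : String) (out : String) : Prop := out = shift_cipher_encrypt_alt s r_move space_flag
instance (s : String) (r_move : Int) (space_flag : String) (out : String) : Decidable (Spec_shift_cipher_encrypt s r_move space_flag out) := by unfold Spec_shift_cipher_encrypt; infer_instance

-- ===== CLAIM (what is proved, stated in full; the proofs are below) =====
def Claim_equal_shift_cipher_encrypt : Prop := ∀ (s : String) (r_move : Int) (space_flag : String), Dom_shift_cipher_encrypt s r_move space_flag → Pre_shift_cipher_encrypt s r_move space_flag → Spec_shift_cipher_encrypt s r_move space_flag (shift_cipher_encrypt s r_move space_flag)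

-- ===== LEMMAS AND PROOFS =====

-- B's per-character output
def pvBChar (r_move : Int) (yes : Bool) (ch : Char) : Char :=
  if yes ∨ (ch.toNat : Int) ≠ 32 then pvChr (pvReduce ((ch.toNat : Int) + r_move)) else pvChr (ch.toNat : Int)

theorem pvPush_eq (c : String) (a : Char) : c.push a = c ++ String.ofList [a] := by
  apply String.toList_inj.mp
  simp

theorem pvOrds_spec (l : List Char) (acc : List Int) :
    l.foldl (fun l ch => l ++ [(ch.toNat : Int)]) acc = acc ++ l.map (fun ch => (ch.toNat : Int)) := by
  induction l generalizing acc with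
  | nil => simp
  | cons a t ih => simp [List.foldl_cons, ih]

theorem pvY_spec (r_move : Int) (l : List Char) (c : String) :
    (l.map (fun ch => (ch.toNat : Int))).foldl (fun c i => c.push (pvChr (pvReduce (i + r_move)))) c
      = c ++ String.ofList (l.map (pvBChar r_move true)) := by
  induction l generalizing c with
  | nil => apply String.toList_inj.mp; simp
  | cons a t ih =>
      rw [List.map_cons, List.foldl_cons, ih]
      apply String.toList_inj.mp
      simp [pvBChar]

theorem pvN_spec (r_move : Int) (l : List Char) (ls : List Int) (c : String) :
    (l.foldl (pvAStepN r_move) (ls, c)).2 = c ++ String.ofList (l.map (pvBChar r_move false)) := by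
  induction l generalizing ls c with
  | nil => apply String.toList_inj.mp; simp
  | cons a t ih =>
      have hstep : pvAStepN r_move (ls, c) a =
          (ls ++ [(a.toNat : Int)], c.push (pvBChar r_move false a)) := by
        simp only [pvAStepN, List.foldl_append, List.foldl_cons, List.foldl_nil, pvBChar]
        by_cases h : (a.toNat : Int) = 32 <;> simp [h, pvChr]
      simp only [List.foldl_cons, hstep, ih, pvPush_eq]
      apply String.toList_inj.mp
      simp

-- ===== VERDICT (by name: the statement is the Claim_ definition above) =====
theorem shift_cipher_encrypt_spec : Claim_equal_shift_cipher_encrypt := by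
  intro s r_move space_flag _ _
  unfold Spec_shift_cipher_encrypt shift_cipher_encrypt shift_cipher_encrypt_alt
  by_cases hy : PySem.Str.upper space_flag = "Y"
  · rw [if_pos hy, if_neg (by simp [hy])]
    rw [pvOrds_spec, List.nil_append, pvY_spec]
    apply String.toList_inj.mp
    simp [pvBChar, hy]
  · by_cases hn : PySem.Str.upper space_flag = "N"
    · rw [if_neg hy, if_pos hn, if_neg (by simp [hn]), pvN_spec]
      apply String.toList_inj.mp
      simp only [String.toList_append, String.toList_ofList]
      have : ("" : String).toList = [] := rfl
      rw [this, List.nil_append]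
      apply List.map_congr_left
      intro ch _
      by_cases h : (ch.toNat : Int) = 32 <;> simp [pvBChar, h, hn]
    · rw [if_neg hy, if_neg hn, if_pos (by simp [hy, hn])]
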